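-- pv_equiv track=rewrite | github.com/MingzhenAo/Constraint-Programming | IQtwist/3Drotatefunction.py | print_repeat
-- ===== SOURCE A (Python) =====
-- def print_repeat(list_):
--     uniques={}
--     repeat={}
--     for key,value in list_.items():
--          if value not in uniques:
--              uniques[value]=key
--          else:
--              if uniques[value] not in repeat:
--                  repeat[uniques[value]]=[key]
--              else:
--                  repeat[uniques[value]].append(key)
--     return repeat
-- ===== SOURCE B (Python) =====
-- def print_repeat(list_):
--     # Pass 1: full grouping value -> all keys having it, in insertion order.
--     groups = {}
--     for key, value in list_.items():
--         groups.setdefault(value, []).append(key)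
--     # Pass 2: emit each repeated value's group at its second occurrence,
--     # so the repeat dict's insertion order matches the original's.
--     repeat = {}
--     count = {}
--     for key, value in list_.items():
--         count[value] = count.get(value, 0) + 1
--         if count[value] == 2:
--             ks = groups[value]
--             repeat[ks[0]] = ks[1:]
--     return repeat
-- ===== Notes on version B (the rewrite author's own statement) =====
-- stated objective: alternative
-- what changed: B builds the complete value-to-keys grouping in one pass and then, in a second pass, emits each repeated value's first key with its remaining keys at the value's second occurrence, replacing A's incremental first-key/append maintenance of the repeat dict.
import Mathlib
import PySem

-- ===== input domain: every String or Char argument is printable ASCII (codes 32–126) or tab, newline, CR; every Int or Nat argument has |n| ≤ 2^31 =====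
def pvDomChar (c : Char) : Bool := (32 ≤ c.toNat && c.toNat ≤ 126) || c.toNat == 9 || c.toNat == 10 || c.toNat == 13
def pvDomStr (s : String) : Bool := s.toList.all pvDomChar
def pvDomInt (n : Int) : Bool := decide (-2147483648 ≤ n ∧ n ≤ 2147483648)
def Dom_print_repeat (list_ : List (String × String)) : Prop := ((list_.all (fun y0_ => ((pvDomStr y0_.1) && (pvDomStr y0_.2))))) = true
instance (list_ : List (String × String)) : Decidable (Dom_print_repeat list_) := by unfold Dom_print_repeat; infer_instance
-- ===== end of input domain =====

-- B replaces A's incremental first-key/append maintenance by building the full value→keys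
-- grouping first and then emitting each repeated value's group at its second occurrence
-- (objective: alternative decomposition, same cost).

-- ===== PORT A =====
-- one loop step of A; 'repeat[u].append(key)' updates the value stored at the existing key u
-- (position kept), transliterated as insert at u of the old list with key appended
def stepA (st : PySem.Dict String String × PySem.Dict String (List String))
    (kv : String × String) :
    PySem.Dict String String × PySem.Dict String (List String) :=
  if st.1.contains kv.2 = false then
    (st.1.insert kv.2 kv.1, st.2)
  else
    let u := st.1.getD kv.2 ""   -- uniques[value]; the key is present in this branch
    if st.2.contains u = false then
      (st.1, st.2.insert u [kv.1])
    else
      (st.1, st.2.insert u (st.2.getD u [] ++ [kv.1]))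

def print_repeat (list_ : List (String × String)) : List (String × List String) :=
  (list_.foldl stepA (PySem.Dict.empty, PySem.Dict.empty)).2.items

-- ===== PORT B =====
-- pass 1: groups.setdefault(value, []).append(key)
def groupsB (list_ : List (String × String)) : PySem.Dict String (List String) :=
  list_.foldl (fun g kv => g.modify kv.2 [] (fun ks => ks ++ [kv.1])) PySem.Dict.empty

-- pass 2, one step: count[value] = count.get(value, 0) + 1; on the second occurrence emit
-- (ks[0], ks[1:]) from the full group ks = groups[value] (present here, ported as getD)
def stepB (g : PySem.Dict String (List String))
    (st : PySem.Dict String Int × PySem.Dict String (List String))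
    (kv : String × String) :
    PySem.Dict String Int × PySem.Dict String (List String) :=
  let count := st.1.insert kv.2 (st.1.getD kv.2 0 + 1)
  if count.getD kv.2 0 = 2 then
    let ks := g.getD kv.2 []
    (count, st.2.insert (PySem.List.pyGetD ks 0 "") (PySem.List.slice ks (some 1) none))
  else
    (count, st.2)

def print_repeat_alt (list_ : List (String × String)) : List (String × List String) :=
  (list_.foldl (stepB (groupsB list_)) (PySem.Dict.empty, PySem.Dict.empty)).2.items

-- ===== PRECONDITION & SPEC =====
-- Pre_ requires pairwise-distinct keys: the Python argument is a dict, which cannot hold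
-- duplicate keys, so an association list with a repeated key encodes no dict input.
def Pre_print_repeat (list_ : List (String × String)) : Prop :=
  (list_.map Prod.fst).Nodup
instance (list_ : List (String × String)) : Decidable (Pre_print_repeat list_) := by
  unfold Pre_print_repeat; infer_instance
def pvWitness_print_repeat : (List (String × String)) := [("a", "x"), ("b", "x")]

def Spec_print_repeat (list_ : List (String × String)) (out : List (String × List String)) : Prop := out = print_repeat_alt list_
instance (list_ : List (String × String)) (out : List (String × List String)) : Decidable (Spec_print_repeat list_ out) := by unfold Spec_print_repeat; infer_instance

-- ===== CLAIM (what is proved, stated in full; the proofs are below) =====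
def Claim_equal_print_repeat : Prop := ∀ (list_ : List (String × String)), Dom_print_repeat list_ → Pre_print_repeat list_ → Spec_print_repeat list_ (print_repeat list_)

-- ===== LEMMAS AND PROOFS =====

-- keys of l carrying value v, in order
def keysOf (l : List (String × String)) (v : String) : List String :=
  (l.filter (fun p => p.2 == v)).map Prod.fst

-- values whose second occurrence lies in the second argument, given the already-seen prefix
def vals2Aux : List String → List String → List String
  | _, [] => []
  | seen, v :: rest =>
    if seen.count v = 1 then v :: vals2Aux (seen ++ [v]) rest
    else vals2Aux (seen ++ [v]) rest

def vals2 (vs : List String) : List String := vals2Aux [] vs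

-- the uniques dict after processing pre
def Uspec (pre : List (String × String)) : PySem.Dict String String :=
  PySem.Dict.mk ((PySem.Set.ofList (pre.map Prod.snd)).map
    (fun v => (v, (keysOf pre v).headD "")))

-- the repeat dict after processing pre, with the groups drawn from L
def Rspec (L pre : List (String × String)) : PySem.Dict String (List String) :=
  PySem.Dict.mk ((vals2 (pre.map Prod.snd)).map
    (fun v => ((keysOf L v).headD "", (keysOf L v).tail)))

theorem keysOf_append_singleton (pre : List (String × String)) (kv : String × String) (v : String) :
    keysOf (pre ++ [kv]) v = keysOf pre v ++ (if kv.2 = v then [kv.1] else []) := by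
  simp only [keysOf, List.filter_append, List.map_append]
  congr 1
  by_cases h : kv.2 = v <;> simp [h]

theorem count_eq_length_keysOf (pre : List (String × String)) (v : String) :
    (pre.map Prod.snd).count v = (keysOf pre v).length := by
  simp only [keysOf, List.length_map, List.count, List.countP_eq_length_filter,
    List.filter_map]
  congr 1

theorem mem_keysOf (pre : List (String × String)) (v k : String) :
    k ∈ keysOf pre v ↔ (k, v) ∈ pre := by
  simp only [keysOf, List.mem_map, List.mem_filter, beq_iff_eq]
  constructor
  · rintro ⟨⟨a, b⟩, ⟨hm, hb⟩, ha⟩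
    simp only at hb ha; subst hb; subst ha; exact hm
  · intro h; exact ⟨(k, v), ⟨h, rfl⟩, rfl⟩

theorem key_val_unique {pre : List (String × String)} (h : (pre.map Prod.fst).Nodup)
    {k v w : String} (h1 : (k, v) ∈ pre) (h2 : (k, w) ∈ pre) : v = w := by
  induction pre with
  | nil => cases h1
  | cons p rest ih =>
    simp only [List.map_cons, List.nodup_cons] at h
    rcases List.mem_cons.mp h1 with e1 | m1 <;> rcases List.mem_cons.mp h2 with e2 | m2
    · rw [← e1] at e2; exact congrArg Prod.snd e2.symm
    · exact absurd (List.mem_map.mpr ⟨(k, w), m2, by rw [← e1]⟩) h.1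
    · exact absurd (List.mem_map.mpr ⟨(k, v), m1, by rw [← e2]⟩) h.1
    · exact ih h.2 m1 m2

theorem headD_mem {ks : List String} (h : ks ≠ []) : ks.headD "" ∈ ks := by
  cases ks with
  | nil => exact absurd rfl h
  | cons a t => simp

theorem heads_distinct {pre : List (String × String)} (h : (pre.map Prod.fst).Nodup)
    {v w : String} (hvw : v ≠ w) (hv : keysOf pre v ≠ []) (hw : keysOf pre w ≠ []) :
    (keysOf pre v).headD "" ≠ (keysOf pre w).headD "" := by
  intro he
  have m1 : ((keysOf pre v).headD "", v) ∈ pre := (mem_keysOf ..).mp (headD_mem hv)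
  have m2 : ((keysOf pre w).headD "", w) ∈ pre := (mem_keysOf ..).mp (headD_mem hw)
  rw [he] at m1
  exact hvw (key_val_unique h m1 m2)

theorem vals2Aux_append (vs : List String) : ∀ (seen : List String) (v : String),
    vals2Aux seen (vs ++ [v]) =
      vals2Aux seen vs ++ (if (seen ++ vs).count v = 1 then [v] else []) := by
  induction vs with
  | nil => intro seen v; simp [vals2Aux]
  | cons u rest ih =>
    intro seen v
    simp only [List.cons_append, vals2Aux]
    rw [ih]
    have hc : List.count v (seen ++ [u] ++ rest) = List.count v (seen ++ u :: rest) := by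
      simp [List.count_append, List.count_cons]
    rw [hc]
    rcases eq_or_ne (List.count u seen) 1 with h1 | h1 <;>
      rcases eq_or_ne (List.count v (seen ++ u :: rest)) 1 with h2 | h2 <;>
        simp [h1, h2]

theorem mem_vals2Aux_iff (vs : List String) : ∀ (seen : List String) (v : String),
    v ∈ vals2Aux seen vs ↔ seen.count v ≤ 1 ∧ 2 ≤ seen.count v + vs.count v := by
  induction vs with
  | nil =>
    intro seen v
    simp only [vals2Aux, List.not_mem_nil, false_iff, List.count_nil]
    omega
  | cons u rest ih =>
    intro seen v
    simp only [vals2Aux]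
    split_ifs with hu
    · simp only [List.mem_cons, ih, List.count_append]
      by_cases hv : v = u
      · subst hv
        have h2 : List.count v (v :: rest) = rest.count v + 1 := List.count_cons_self ..
        have h3 : List.count v [v] = 1 := by simp
        rw [h2, h3]
        simp only [true_or, true_iff]
        omega
      · have h1 : List.count v [u] = 0 := by
          simp [List.count_cons]; exact fun e => hv e.symm
        have h2 : List.count v (u :: rest) = rest.count v := by
          simp [List.count_cons]; exact fun e => hv e.symm
        rw [h1, h2]
        simp only [hv, false_or]
        omega
    · rw [ih, List.count_append]
      by_cases hv : v = u
      · subst hv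
        have h2 : List.count v (v :: rest) = rest.count v + 1 := List.count_cons_self ..
        have h3 : List.count v [v] = 1 := by simp
        rw [h2, h3]
        omega
      · have h1 : List.count v [u] = 0 := by
          simp [List.count_cons]; exact fun e => hv e.symm
        have h2 : List.count v (u :: rest) = rest.count v := by
          simp [List.count_cons]; exact fun e => hv e.symm
        rw [h1, h2]
        omega

theorem nodup_vals2Aux (vs : List String) : ∀ (seen : List String), (vals2Aux seen vs).Nodup := by
  induction vs with
  | nil => intro seen; simp [vals2Aux]
  | cons v rest ih =>
    intro seen
    simp only [vals2Aux]
    split_ifs with hc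
    · refine List.nodup_cons.mpr ⟨fun hm => ?_, ih (seen ++ [v])⟩
      have := ((mem_vals2Aux_iff rest (seen ++ [v]) v).mp hm).1
      rw [List.count_append] at this
      simp at this
      omega
    · exact ih (seen ++ [v])

theorem mem_vals2_iff {vs : List String} {w : String} : w ∈ vals2 vs ↔ 2 ≤ vs.count w := by
  have := mem_vals2Aux_iff vs [] w
  simpa [vals2] using this

theorem nodup_vals2 (vs : List String) : (vals2 vs).Nodup := nodup_vals2Aux vs []

theorem vals2_append (vs : List String) (v : String) :
    vals2 (vs ++ [v]) = vals2 vs ++ (if vs.count v = 1 then [v] else []) := by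
  simpa using vals2Aux_append vs [] v

-- small list facts used below
theorem getD_zero_headD (xs : List String) (d : String) : xs.getD 0 d = xs.headD d := by
  cases xs <;> simp

theorem headD_append_ne_nil {ks : List String} (ts : List String) (h : ks ≠ []) (d : String) :
    (ks ++ ts).headD d = ks.headD d := by
  cases ks with
  | nil => exact absurd rfl h
  | cons a t => simp

theorem tail_append_ne_nil {ks : List String} (ts : List String) (h : ks ≠ []) :
    (ks ++ ts).tail = ks.tail ++ ts := by
  cases ks with
  | nil => exact absurd rfl h
  | cons a t => simp

theorem keysOf_ne_nil_of_mem {pre : List (String × String)} {v : String}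
    (h : v ∈ pre.map Prod.snd) : keysOf pre v ≠ [] := by
  have h1 : 0 < (pre.map Prod.snd).count v := List.count_pos_iff.mpr h
  rw [count_eq_length_keysOf] at h1
  exact List.ne_nil_of_length_pos h1

-- items/keys of the spec dicts
theorem Uspec_keys (pre : List (String × String)) :
    (Uspec pre).keys = PySem.Set.ofList (pre.map Prod.snd) := by
  simp [Uspec, PySem.Dict.keys, List.map_map, Function.comp_def]

theorem Uspec_keys_nodup (pre : List (String × String)) : (Uspec pre).keys.Nodup := by
  rw [Uspec_keys]; exact PySem.Set.nodup_ofList _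

theorem Uspec_contains (pre : List (String × String)) (v : String) :
    (Uspec pre).contains v = true ↔ v ∈ pre.map Prod.snd := by
  rw [PySem.Dict.contains_eq_decide_mem_keys, Uspec_keys]
  simp [PySem.Set.mem_ofList]

theorem Uspec_getD (pre : List (String × String)) (v : String)
    (h : v ∈ pre.map Prod.snd) :
    (Uspec pre).getD v "" = (keysOf pre v).headD "" := by
  apply PySem.Dict.getD_of_mem_items _ _ (Uspec_keys_nodup pre)
  simp only [Uspec, List.mem_map]
  exact ⟨v, (PySem.Set.mem_ofList ..).mpr h, rfl⟩

theorem Rspec_keys (L pre : List (String × String)) :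
    (Rspec L pre).keys = (vals2 (pre.map Prod.snd)).map (fun v => (keysOf L v).headD "") := by
  simp [Rspec, PySem.Dict.keys, List.map_map, Function.comp_def]

theorem Rspec_contains (L pre : List (String × String)) (k : String) :
    (Rspec L pre).contains k = true ↔
      ∃ w ∈ vals2 (pre.map Prod.snd), k = (keysOf L w).headD "" := by
  rw [PySem.Dict.contains_eq_decide_mem_keys, Rspec_keys]
  simp [eq_comm]

-- the head key of a value with at least one occurrence is never the head key of a
-- DIFFERENT repeated value (keys are distinct)
theorem head_not_in_Rspec {L pre : List (String × String)} (hL : (L.map Prod.fst).Nodup)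
    {v : String} (hv : keysOf L v ≠ [])
    (hsub : ∀ w ∈ vals2 (pre.map Prod.snd), keysOf L w ≠ [])
    (hnm : v ∉ vals2 (pre.map Prod.snd)) :
    (Rspec L pre).contains ((keysOf L v).headD "") = false := by
  rw [Bool.eq_false_iff]
  intro hc
  obtain ⟨w, hw, he⟩ := (Rspec_contains ..).mp hc
  have hvw : v ≠ w := fun e => hnm (e ▸ hw)
  exact heads_distinct hL hvw hv (hsub w hw) he

-- ===== characterisation of A's fold =====
theorem Uspec_items (pre : List (String × String)) :
    (Uspec pre).items = (PySem.Set.ofList (pre.map Prod.snd)).map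
      (fun v => (v, (keysOf pre v).headD "")) := rfl

theorem Rspec_items (L pre : List (String × String)) :
    (Rspec L pre).items = (vals2 (pre.map Prod.snd)).map
      (fun v => ((keysOf L v).headD "", (keysOf L v).tail)) := rfl

theorem Uspec_append_of_mem (pre : List (String × String)) (kv : String × String)
    (h : kv.2 ∈ pre.map Prod.snd) : Uspec (pre ++ [kv]) = Uspec pre := by
  apply PySem.Dict.ext
  rw [Uspec_items, Uspec_items,
    show (pre ++ [kv]).map Prod.snd = pre.map Prod.snd ++ [kv.2] from by simp,
    PySem.Set.ofList_append_singleton, PySem.Set.add_of_mem ((PySem.Set.mem_ofList _ _).mpr h)]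
  apply List.map_congr_left
  intro w hw
  rw [keysOf_append_singleton]
  by_cases hwv : kv.2 = w
  · subst hwv
    rw [if_pos rfl, headD_append_ne_nil _ (keysOf_ne_nil_of_mem h) _]
  · simp [hwv]

theorem stepA_spec (pre : List (String × String)) (kv : String × String)
    (h : (pre.map Prod.fst).Nodup) :
    stepA (Uspec pre, Rspec pre pre) kv = (Uspec (pre ++ [kv]), Rspec (pre ++ [kv]) (pre ++ [kv])) := by
  have hvs : (pre ++ [kv]).map Prod.snd = pre.map Prod.snd ++ [kv.2] := by simp
  by_cases h0 : kv.2 ∈ pre.map Prod.snd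
  · -- the value has been seen before
    have hU : (Uspec pre).contains kv.2 = true := (Uspec_contains pre kv.2).mpr h0
    have hu : (Uspec pre).getD kv.2 "" = (keysOf pre kv.2).headD "" := Uspec_getD pre kv.2 h0
    have hkne : keysOf pre kv.2 ≠ [] := keysOf_ne_nil_of_mem h0
    have hsub : ∀ w ∈ vals2 (pre.map Prod.snd), keysOf pre w ≠ [] := by
      intro w hw
      apply keysOf_ne_nil_of_mem
      apply List.count_pos_iff.mp
      have := mem_vals2_iff.mp hw
      omega
    by_cases hn1 : (pre.map Prod.snd).count kv.2 = 1
    · -- second occurrence: a fresh repeat entry is created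
      have hnm : kv.2 ∉ vals2 (pre.map Prod.snd) := fun hm => by
        have := mem_vals2_iff.mp hm; omega
      have hrep : (Rspec pre pre).contains ((keysOf pre kv.2).headD "") = false :=
        head_not_in_Rspec h hkne hsub hnm
      simp only [stepA]
      rw [hU, if_neg (by simp), hu, hrep, if_pos rfl]
      refine Prod.ext ?_ ?_
      · exact (Uspec_append_of_mem pre kv h0).symm
      · have hlen : (keysOf pre kv.2).length = 1 := by
          rw [← count_eq_length_keysOf]; exact hn1
        obtain ⟨u0, hu0⟩ := List.length_eq_one_iff.mp hlen
        apply PySem.Dict.ext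
        rw [PySem.Dict.items_insert_of_not_contains _ _ hrep, Rspec_items, Rspec_items, hvs,
          vals2_append, if_pos hn1, List.map_append]
        congr 1
        · apply List.map_congr_left
          intro w hw
          have hne : kv.2 ≠ w := fun e => hnm (e ▸ hw)
          rw [keysOf_append_singleton, if_neg hne, List.append_nil]
        · simp [keysOf_append_singleton, hu0]
    · -- third or later occurrence: the existing repeat entry is extended
      have hge2 : 2 ≤ (pre.map Prod.snd).count kv.2 := by
        have := List.count_pos_iff.mpr h0
        omega
      have hm2 : kv.2 ∈ vals2 (pre.map Prod.snd) := mem_vals2_iff.mpr hge2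
      have hrep : (Rspec pre pre).contains ((keysOf pre kv.2).headD "") = true :=
        (Rspec_contains pre pre _).mpr ⟨kv.2, hm2, rfl⟩
      have hRnodup : (Rspec pre pre).keys.Nodup := by
        rw [Rspec_keys]
        refine (nodup_vals2 _).map_on ?_
        intro x hx y hy he
        by_contra hne
        exact heads_distinct h hne (hsub x hx) (hsub y hy) he
      have hgetD : (Rspec pre pre).getD ((keysOf pre kv.2).headD "") [] = (keysOf pre kv.2).tail :=
        PySem.Dict.getD_of_mem_items _
          (by rw [Rspec_items]; exact List.mem_map.mpr ⟨kv.2, hm2, rfl⟩) hRnodup []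
      simp only [stepA]
      rw [hU, if_neg (by simp), hu, hrep, if_neg (by simp), hgetD]
      refine Prod.ext ?_ ?_
      · exact (Uspec_append_of_mem pre kv h0).symm
      · apply PySem.Dict.ext
        rw [PySem.Dict.items_insert_of_contains _ _ hrep, Rspec_items, Rspec_items, hvs,
          vals2_append, if_neg hn1, List.append_nil, List.map_map]
        apply List.map_congr_left
        intro w hw
        by_cases hwv : w = kv.2
        · subst hwv
          rw [keysOf_append_singleton, if_pos rfl,
            headD_append_ne_nil _ hkne, tail_append_ne_nil _ hkne]
          simp
        · have hne : ((keysOf pre w).headD "" == (keysOf pre kv.2).headD "") = false :=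
            beq_eq_false_iff_ne.mpr (heads_distinct h hwv (hsub w hw) hkne)
          rw [keysOf_append_singleton, if_neg (fun e => hwv e.symm), List.append_nil]
          have hne2 : (keysOf pre w).head?.getD "" ≠ (keysOf pre kv.2).head?.getD "" := by
            simpa using beq_eq_false_iff_ne.mp hne
          simp
          exact fun he => absurd he hne2
  · -- first occurrence of the value
    have hU : (Uspec pre).contains kv.2 = false := by
      rw [Bool.eq_false_iff]
      intro hc
      exact h0 ((Uspec_contains pre kv.2).mp hc)
    have hk0 : keysOf pre kv.2 = [] := by
      apply List.eq_nil_of_length_eq_zero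
      rw [← count_eq_length_keysOf]
      exact List.count_eq_zero.mpr h0
    simp only [stepA]
    rw [hU, if_pos rfl]
    refine Prod.ext ?_ ?_
    · apply PySem.Dict.ext
      rw [PySem.Dict.items_insert_of_not_contains _ _ hU, Uspec_items, Uspec_items, hvs,
        PySem.Set.ofList_append_singleton,
        PySem.Set.add_of_not_mem (fun hm => h0 ((PySem.Set.mem_ofList _ _).mp hm)),
        List.map_append]
      congr 1
      · apply List.map_congr_left
        intro w hw
        have hne : kv.2 ≠ w := fun e => h0 (e ▸ (PySem.Set.mem_ofList _ _).mp hw)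
        rw [keysOf_append_singleton, if_neg hne, List.append_nil]
      · simp [keysOf_append_singleton, hk0]
    · apply PySem.Dict.ext
      rw [Rspec_items, Rspec_items, hvs, vals2_append,
        if_neg (by rw [List.count_eq_zero.mpr h0]; omega), List.append_nil]
      apply List.map_congr_left
      intro w hw
      have hne : kv.2 ≠ w := fun e => by
        have := mem_vals2_iff.mp hw
        rw [← e, List.count_eq_zero.mpr h0] at this
        omega
      rw [keysOf_append_singleton, if_neg hne, List.append_nil]

theorem foldA_spec (l : List (String × String)) : ∀ (pre : List (String × String)),
    ((pre ++ l).map Prod.fst).Nodup →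
    l.foldl stepA (Uspec pre, Rspec pre pre) = (Uspec (pre ++ l), Rspec (pre ++ l) (pre ++ l)) := by
  induction l with
  | nil => intro pre _; simp
  | cons kv rest ih =>
    intro pre h
    have hpre : (pre.map Prod.fst).Nodup := by
      rw [List.map_append] at h
      exact h.sublist (List.sublist_append_left _ _)
    have h' : (((pre ++ [kv]) ++ rest).map Prod.fst).Nodup := by
      simpa [List.append_assoc] using h
    have := ih (pre ++ [kv]) h'
    rw [List.foldl_cons, stepA_spec pre kv hpre, this]
    simp [List.append_assoc]

theorem print_repeat_eq (l : List (String × String)) (h : (l.map Prod.fst).Nodup) :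
    print_repeat l = (Rspec l l).items := by
  have h0 : (([] ++ l).map Prod.fst).Nodup := by simpa using h
  have e0 : (PySem.Dict.empty, PySem.Dict.empty) = (Uspec [], Rspec [] []) := rfl
  unfold print_repeat
  rw [e0, foldA_spec l [] h0]
  simp

-- ===== characterisation of B's folds =====
theorem groupsB_getD (l : List (String × String)) (v : String) :
    (groupsB l).getD v [] = keysOf l v := by
  unfold groupsB
  rw [show (l.foldl (fun g kv => g.modify kv.2 [] (fun ks => ks ++ [kv.1])) PySem.Dict.empty)
      = ((l.map (fun p => (p.2, p.1))).foldl (fun d p => d.modify p.1 [] (fun x => x ++ [p.2]))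
          PySem.Dict.empty) by rw [List.foldl_map]]
  rw [PySem.Dict.getD_foldl_modify_append]
  simp [keysOf, List.filter_map, Function.comp_def]

theorem stepB_spec (L pre : List (String × String)) (kv : String × String)
    (hL : (L.map Prod.fst).Nodup)
    (hsub : ∀ v : String, ((pre ++ [kv]).map Prod.snd).count v ≤ (L.map Prod.snd).count v) :
    stepB (groupsB L) (PySem.Dict.counter (pre.map Prod.snd), Rspec L pre) kv =
      (PySem.Dict.counter ((pre ++ [kv]).map Prod.snd), Rspec L (pre ++ [kv])) := by
  have hvs : (pre ++ [kv]).map Prod.snd = pre.map Prod.snd ++ [kv.2] := by simp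
  have hcnt : (PySem.Dict.counter (pre.map Prod.snd)).insert kv.2
      ((PySem.Dict.counter (pre.map Prod.snd)).getD kv.2 0 + 1)
      = PySem.Dict.counter (pre.map Prod.snd ++ [kv.2]) := by
    rw [PySem.Dict.counter_append_singleton]
    rfl
  have hget : (PySem.Dict.counter (pre.map Prod.snd ++ [kv.2])).getD kv.2 0
      = ((pre.map Prod.snd).count kv.2 : Int) + 1 := by
    rw [PySem.Dict.getD_counter, List.count_append]
    push_cast
    simp
  have hsubL : ∀ w ∈ vals2 (pre.map Prod.snd), keysOf L w ≠ [] := by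
    intro w hw
    apply keysOf_ne_nil_of_mem
    apply List.count_pos_iff.mp
    have h1 := mem_vals2_iff.mp hw
    have h2 := hsub w
    rw [hvs, List.count_append] at h2
    omega
  by_cases hn1 : (pre.map Prod.snd).count kv.2 = 1
  · -- second occurrence: emit the full group of this value
    have hLk : keysOf L kv.2 ≠ [] := by
      apply keysOf_ne_nil_of_mem
      apply List.count_pos_iff.mp
      have h2 := hsub kv.2
      rw [hvs, List.count_append] at h2
      simp at h2
      omega
    have hnm : kv.2 ∉ vals2 (pre.map Prod.snd) := fun hm => by
      have := mem_vals2_iff.mp hm; omega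
    have hrep : (Rspec L pre).contains ((keysOf L kv.2).headD "") = false :=
      head_not_in_Rspec hL hLk hsubL hnm
    have hcond : (PySem.Dict.counter (pre.map Prod.snd ++ [kv.2])).getD kv.2 0 = 2 := by
      rw [hget, hn1]
      norm_num
    simp only [stepB]
    rw [hcnt, if_pos hcond, groupsB_getD, PySem.List.pyGetD_zero, getD_zero_headD,
      PySem.List.slice_from_one]
    refine Prod.ext ?_ ?_
    · rw [hvs]
    · apply PySem.Dict.ext
      rw [PySem.Dict.items_insert_of_not_contains _ _ hrep, Rspec_items, Rspec_items, hvs,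
        vals2_append, if_pos hn1, List.map_append]
      simp
  · -- not the second occurrence: nothing is emitted
    have hcond : ¬ ((PySem.Dict.counter (pre.map Prod.snd ++ [kv.2])).getD kv.2 0 = 2) := by
      rw [hget]
      have : ((pre.map Prod.snd).count kv.2 : Int) ≠ 1 := by exact_mod_cast hn1
      omega
    simp only [stepB]
    rw [hcnt, if_neg hcond]
    refine Prod.ext ?_ ?_
    · rw [hvs]
    · apply PySem.Dict.ext
      rw [Rspec_items, Rspec_items, hvs, vals2_append, if_neg hn1, List.append_nil]

theorem foldB_spec (L : List (String × String)) (hL : (L.map Prod.fst).Nodup) :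
    ∀ (l pre : List (String × String)), L = pre ++ l →
    l.foldl (stepB (groupsB L)) (PySem.Dict.counter (pre.map Prod.snd), Rspec L pre) =
      (PySem.Dict.counter (L.map Prod.snd), Rspec L L) := by
  intro l
  induction l with
  | nil => intro pre hpe; simp [hpe]
  | cons kv rest ih =>
    intro pre hpe
    have hpe' : L = (pre ++ [kv]) ++ rest := by simp [hpe, List.append_assoc]
    have hsub : ∀ v : String, ((pre ++ [kv]).map Prod.snd).count v ≤ (L.map Prod.snd).count v := by
      intro v
      rw [hpe']
      simp only [List.map_append, List.count_append]
      omega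
    rw [List.foldl_cons, stepB_spec L pre kv hL hsub, ih (pre ++ [kv]) hpe']

theorem print_repeat_alt_eq (l : List (String × String)) (h : (l.map Prod.fst).Nodup) :
    print_repeat_alt l = (Rspec l l).items := by
  have e0 : ((PySem.Dict.empty : PySem.Dict String Int), (PySem.Dict.empty : PySem.Dict String (List String)))
      = (PySem.Dict.counter (([] : List (String × String)).map Prod.snd), Rspec l []) := rfl
  unfold print_repeat_alt
  rw [e0, foldB_spec l h l [] rfl]

-- ===== VERDICT (by name: the statement is the Claim_ definition above) =====
theorem print_repeat_spec : Claim_equal_print_repeat := by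
  intro l _ hpre
  unfold Spec_print_repeat
  rw [print_repeat_eq l hpre, print_repeat_alt_eq l hpre]
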